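-- pv_equiv track=rewrite | github.com/vrajeshsh/python-practice | 10. Class & Object/10. Class & Object/01. Control Statement Applns/03. Number Applns/(x) 07. Generate Keith Numbers.py | isKeith
-- ===== SOURCE A (Python) =====
-- def isKeith(n):
--     nums, temp, cnt = [], n, 0
--     while temp>0:
--         nums.append(temp%10)
--         cnt+=1
--         temp//=10
--     nums.reverse()
--     nxt, i = 0, cnt
--     while nxt<n:
--         nxt = 0
--         for j in range(1, cnt+1):
--             nxt+=nums[i-j]
--         nums.append(nxt)
--         i+=1
--     return nxt==n
-- ===== SOURCE B (Python) =====
-- def isKeith(n):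
--     # Build the digit window most-significant-first, then generate Keith terms
--     # with an O(1) running window sum instead of re-summing the window each step.
--     seq, temp = [], n
--     while temp > 0:
--         seq.insert(0, temp % 10)
--         temp //= 10
--     if not seq:
--         return n == 0
--     running = sum(seq)
--     nxt, i = 0, 0
--     while nxt < n:
--         nxt = running
--         seq.append(nxt)
--         running += nxt - seq[i]
--         i += 1
--     return nxt == n
-- ===== Notes on version B (the rewrite author's own statement) =====
-- stated objective: alternative
-- what changed: B builds the digit window most-significant-first without a reverse and replaces A's inner per-term re-summation of the last cnt digits by an incrementally maintained running window sum, updated in O(1) per generated term.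
import Mathlib
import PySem

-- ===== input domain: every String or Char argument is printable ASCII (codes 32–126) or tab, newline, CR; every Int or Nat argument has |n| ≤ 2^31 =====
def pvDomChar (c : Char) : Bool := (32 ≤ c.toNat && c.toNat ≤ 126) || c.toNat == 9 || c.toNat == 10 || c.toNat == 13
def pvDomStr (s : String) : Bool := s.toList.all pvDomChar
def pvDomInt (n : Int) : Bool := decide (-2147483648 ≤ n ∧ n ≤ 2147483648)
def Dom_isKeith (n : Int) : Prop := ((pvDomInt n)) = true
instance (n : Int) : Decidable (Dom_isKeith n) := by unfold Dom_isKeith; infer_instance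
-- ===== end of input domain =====

-- B replaces A's inner re-summation of the digit window by a running window sum
-- maintained in O(1) per generated term, and builds the digit list MSB-first
-- without a reverse (objective: alternative single-pass decomposition).

-- ===== PORT A =====
-- while temp>0: nums.append(temp%10); cnt+=1; temp//=10
-- (fuel bounds the loop: temp//10 < temp, so temp.toNat+1 steps suffice)
def isKeithDigsA (fuel : Nat) (temp : Int) (nums : List Int) (cnt : Int) : List Int × Int :=
  match fuel with
  | 0 => (nums, cnt)
  | f + 1 =>
    if temp > 0 then
      isKeithDigsA f (PySem.Int.floordiv temp 10) (nums ++ [PySem.Int.mod temp 10]) (cnt + 1)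
    else (nums, cnt)

-- while nxt<n: nxt = sum over j in range(1,cnt+1) of nums[i-j]; nums.append(nxt); i+=1
-- (index i-j is always in range on reachable states, so pyGetD is exact;
--  fuel bounds the loop, both ports use the same fuel)
def isKeithLoopA (fuel : Nat) (n : Int) (nums : List Int) (cnt : Int) (nxt i : Int) : Bool :=
  match fuel with
  | 0 => decide (nxt = n)
  | f + 1 =>
    if nxt < n then
      let nxt' := (PySem.List.pyRange 1 (cnt + 1) 1).foldl
        (fun acc j => acc + PySem.List.pyGetD nums (i - j) 0) 0
      isKeithLoopA f n (nums ++ [nxt']) cnt nxt' (i + 1)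
    else decide (nxt = n)

def isKeith (n : Int) : Bool :=
  let dc := isKeithDigsA (n.toNat + 1) n [] 0
  let nums := dc.1.reverse
  isKeithLoopA (n.toNat + 12) n nums dc.2 0 dc.2

-- ===== PORT B =====
-- while temp>0: seq.insert(0, temp%10); temp//=10
def isKeithDigsB (fuel : Nat) (temp : Int) (seq : List Int) : List Int :=
  match fuel with
  | 0 => seq
  | f + 1 =>
    if temp > 0 then
      isKeithDigsB f (PySem.Int.floordiv temp 10) (PySem.Int.mod temp 10 :: seq)
    else seq

-- while nxt<n: nxt = running; seq.append(nxt); running += nxt - seq[i]; i+=1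
def isKeithLoopB (fuel : Nat) (n : Int) (seq : List Int) (running nxt i : Int) : Bool :=
  match fuel with
  | 0 => decide (nxt = n)
  | f + 1 =>
    if nxt < n then
      let nxt' := running
      let seq' := seq ++ [nxt']
      isKeithLoopB f n seq' (running + nxt' - PySem.List.pyGetD seq' i 0) nxt' (i + 1)
    else decide (nxt = n)

def isKeith_alt (n : Int) : Bool :=
  let seq := isKeithDigsB (n.toNat + 1) n []
  if seq = [] then decide (n = 0)
  else isKeithLoopB (n.toNat + 12) n seq (seq.foldl (· + ·) 0) 0 0

-- ===== PRECONDITION & SPEC =====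
def Spec_isKeith (n : Int) (out : Bool) : Prop := out = isKeith_alt n
instance (n : Int) (out : Bool) : Decidable (Spec_isKeith n out) := by unfold Spec_isKeith; infer_instance

-- ===== CLAIM (what is proved, stated in full; the proofs are below) =====
def Claim_equal_isKeith : Prop := ∀ (n : Int), Dom_isKeith n → Spec_isKeith n (isKeith n)



-- ===== LEMMAS AND PROOFS =====

-- digits of temp, least-significant first (proof-side characterisation of both digit loops)
def kDigs (fuel : Nat) (temp : Int) : List Int :=
  match fuel with
  | 0 => []
  | f + 1 =>
    if temp > 0 then PySem.Int.mod temp 10 :: kDigs f (PySem.Int.floordiv temp 10) else []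

theorem digsA_eq (fuel : Nat) : ∀ (temp : Int) (nums : List Int) (cnt : Int),
    isKeithDigsA fuel temp nums cnt
      = (nums ++ kDigs fuel temp, cnt + ((kDigs fuel temp).length : Int)) := by
  induction fuel with
  | zero => intro temp nums cnt; simp [isKeithDigsA, kDigs]
  | succ f ih =>
    intro temp nums cnt
    simp only [isKeithDigsA, kDigs]
    split
    · rw [ih]
      refine Prod.ext ?_ ?_ <;> simp
      ring
    · simp

theorem digsB_eq (fuel : Nat) : ∀ (temp : Int) (seq : List Int),
    isKeithDigsB fuel temp seq = (kDigs fuel temp).reverse ++ seq := by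
  induction fuel with
  | zero => intro temp seq; simp [isKeithDigsB, kDigs]
  | succ f ih =>
    intro temp seq
    simp only [isKeithDigsB, kDigs]
    split
    · rw [ih]; simp
    · simp

theorem kDigs_nil_iff (f : Nat) (temp : Int) : kDigs (f + 1) temp = [] ↔ ¬ temp > 0 := by
  simp only [kDigs]
  split <;> simp_all

theorem loopA_exit (fuel : Nat) (n : Int) (L : List Int) (cnt nxt i : Int) (h : ¬ nxt < n) :
    isKeithLoopA fuel n L cnt nxt i = decide (nxt = n) := by
  cases fuel with
  | zero => rfl
  | succ f => simp only [isKeithLoopA]; rw [if_neg h]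

-- A's inner loop over j=1..cnt sums exactly the last cnt elements when i = length
theorem sumWindow (L : List Int) (cnt : Nat) (hcnt : cnt ≤ L.length) :
    (PySem.List.pyRange 1 ((cnt : Int) + 1) 1).foldl
        (fun acc j => acc + PySem.List.pyGetD L ((L.length : Int) - j) 0) 0
      = (L.drop (L.length - cnt)).sum := by
  induction cnt with
  | zero =>
    rw [PySem.List.pyRange_one_eq_nil (by norm_num)]
    simp
  | succ c ih =>
    rw [show (((c + 1 : Nat) : Int) + 1) = ((c : Int) + 1) + 1 by push_cast; ring,
        PySem.List.pyRange_one_succ_right (by omega),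
        List.foldl_append, ih (by omega)]
    simp only [List.foldl_cons, List.foldl_nil]
    have hidx : (L.length : Int) - ((c : Int) + 1) = ((L.length - (c + 1) : Nat) : Int) := by
      omega
    rw [hidx, PySem.List.pyGetD_natCast]
    have hlt : L.length - (c + 1) < L.length := by omega
    rw [List.getD_eq_getElem L 0 hlt]
    rw [List.drop_eq_getElem_cons hlt]
    rw [show L.length - (c + 1) + 1 = L.length - c by omega, List.sum_cons]
    ring

-- the two generation loops agree: B's running value is the sum of the last cnt elements
theorem loop_eq (fuel : Nat) : ∀ (n : Int) (L : List Int) (cnt : Nat), cnt ≤ L.length →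
    ∀ (nxt : Int),
    isKeithLoopA fuel n L (cnt : Int) nxt (L.length : Int)
      = isKeithLoopB fuel n L ((L.drop (L.length - cnt)).sum) nxt ((L.length - cnt : Nat) : Int) := by
  induction fuel with
  | zero => intro n L cnt hcnt nxt; simp [isKeithLoopA, isKeithLoopB]
  | succ f ih =>
    intro n L cnt hcnt nxt
    simp only [isKeithLoopA, isKeithLoopB]
    split
    · set S : Int := (L.drop (L.length - cnt)).sum with hS
      rw [sumWindow L cnt hcnt, ← hS]
      have hdrop_elt : PySem.List.pyGetD (L ++ [S]) ((L.length - cnt : Nat) : Int) 0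
          = (L ++ [S]).getD (L.length - cnt) 0 := PySem.List.pyGetD_natCast _ _ _
      have hrun : S + S - PySem.List.pyGetD (L ++ [S]) ((L.length - cnt : Nat) : Int) 0
          = ((L ++ [S]).drop ((L ++ [S]).length - cnt)).sum := by
        rw [hdrop_elt]
        rcases Nat.eq_zero_or_pos cnt with hc0 | hcpos
        · subst hc0
          have hS0 : S = 0 := by rw [hS]; simp
          have hgd : (L ++ [S]).getD (L.length - 0) 0 = S := by
            rw [Nat.sub_zero, List.getD_eq_getElem _ 0 (by simp)]
            simp
          have hdr : ((L ++ [S]).drop ((L ++ [S]).length - 0)).sum = 0 := by simp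
          rw [hgd, hdr]
          omega
        · have hlt : L.length - cnt < L.length := by omega
          have hget : (L ++ [S]).getD (L.length - cnt) 0 = L[L.length - cnt] := by
            rw [List.getD_eq_getElem _ 0 (by simp only [List.length_append, List.length_singleton]; omega)]
            exact List.getElem_append_left hlt
          have hlen2 : (L ++ [S]).length - cnt = L.length + 1 - cnt := by simp
          have hdr : (L ++ [S]).drop (L.length + 1 - cnt) = L.drop (L.length + 1 - cnt) ++ [S] :=
            List.drop_append_of_le_length (by omega)
          have hScons : S = L[L.length - cnt] + (L.drop (L.length + 1 - cnt)).sum := by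
            rw [hS, List.drop_eq_getElem_cons hlt, List.sum_cons,
              show L.length - cnt + 1 = L.length + 1 - cnt by omega]
          rw [hget, hlen2, hdr, List.sum_append, List.sum_cons, List.sum_nil]
          omega
      rw [hrun]
      have hlapp : (L ++ [S]).length = L.length + 1 := by simp
      have e1 : (L.length : Int) + 1 = (((L ++ [S]).length : Nat) : Int) := by
        simp only [hlapp]; push_cast; ring
      have e2 : ((L.length - cnt : Nat) : Int) + 1 = (((L ++ [S]).length - cnt : Nat) : Int) := by
        simp only [hlapp]; omega
      rw [e1, e2]
      exact ih n (L ++ [S]) cnt (by simp only [hlapp]; omega) S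
    · rfl

theorem foldl_add_eq_sum (L : List Int) : L.foldl (· + ·) 0 = L.sum := by
  simpa using (PySem.List.foldl_add (l := L) (g := id) (a := 0))

-- ===== VERDICT (by name: the statement is the Claim_ definition above) =====
theorem isKeith_spec : Claim_equal_isKeith := by
  intro n _
  unfold Spec_isKeith isKeith isKeith_alt
  simp only [digsA_eq, digsB_eq, List.nil_append, List.append_nil, zero_add]
  by_cases hnil : (kDigs (n.toNat + 1) n).reverse = []
  · have hn : ¬ (0 : Int) < n := by
      have := (kDigs_nil_iff n.toNat n).mp (by simpa using hnil)
      simpa using this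
    rw [if_pos hnil, hnil, loopA_exit _ _ _ _ _ _ hn]
    simp [eq_comm]
  · rw [if_neg hnil, foldl_add_eq_sum]
    have hlen : (kDigs (n.toNat + 1) n).length = ((kDigs (n.toNat + 1) n).reverse).length := by
      simp
    rw [hlen]
    have := loop_eq (n.toNat + 12) n ((kDigs (n.toNat + 1) n).reverse)
      ((kDigs (n.toNat + 1) n).reverse).length le_rfl 0
    simpa using this
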